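-- pv_equiv track=rewrite | github.com/saleprobe/Algorithm | Programmers/the_next_number_to_come.py | solution
-- ===== SOURCE A (Python) =====
-- def solution(common):
--     answer = 0
--     if abs(common[0] - common[1]) == abs(common[1] - common[2]):
--         answer = common[len(common)-1] + (common[1] - common[0])
--     elif common[0] != 1:
--         공비 = common[1] - common[0]
--         answer = 1
--         for _ in range(0, len(common)+1):
--             answer = answer * 공비
--     else:
--         공비 = common[1]
--         answer = 1
--         for _ in range(0, len(common)):
--             answer = answer * 공비
--     return answer
-- ===== SOURCE B (Python) =====
-- def solution(common):
--     a, b, c = common[0], common[1], common[2]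
--     if abs(a - b) == abs(b - c):
--         return common[-1] + b - a
--     base, e = (b - a, len(common) + 1) if a != 1 else (b, len(common))
--     r = 1
--     while e:
--         if e & 1:
--             r *= base
--         base *= base
--         e >>= 1
--     return r
-- ===== Notes on version B (the rewrite author's own statement) =====
-- stated objective: faster
-- what changed: Replaces A's O(n) repeated-multiplication loops with a hand-written exponentiation-by-squaring loop (and selects base/exponent as a tuple instead of two separate loop branches).
import Mathlib
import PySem

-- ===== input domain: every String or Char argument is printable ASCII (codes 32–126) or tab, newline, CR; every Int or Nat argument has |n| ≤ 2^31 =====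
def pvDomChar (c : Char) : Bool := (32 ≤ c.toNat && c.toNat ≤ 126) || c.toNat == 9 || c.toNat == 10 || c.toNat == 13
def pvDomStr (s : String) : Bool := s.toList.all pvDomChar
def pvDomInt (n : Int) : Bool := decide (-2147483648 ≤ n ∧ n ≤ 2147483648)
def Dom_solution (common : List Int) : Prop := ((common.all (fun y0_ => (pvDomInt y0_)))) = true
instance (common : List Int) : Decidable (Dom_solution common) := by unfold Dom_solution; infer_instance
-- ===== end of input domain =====

-- B replaces A's repeated-multiplication loops with an exponentiation-by-squaring loop; faster (O(log n) vs O(n) multiplications).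


-- ===== PORT A =====
def solution (common : List Int) : Int :=
  let c0 := (PySem.List.pyGet? common 0).getD 0
  let c1 := (PySem.List.pyGet? common 1).getD 0
  let c2 := (PySem.List.pyGet? common 2).getD 0
  if |c0 - c1| = |c1 - c2| then
    (PySem.List.pyGet? common ((common.length : Int) - 1)).getD 0 + (c1 - c0)
  else if c0 ≠ 1 then
    (PySem.List.pyRange 0 (common.length + 1) 1).foldl (fun a _ => a * (c1 - c0)) 1
  else
    (PySem.List.pyRange 0 common.length 1).foldl (fun a _ => a * c1) 1

-- ===== PORT B =====
-- B's while-loop: square-and-multiply with state (r, base, e)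
def sqLoop (r base : Int) (e : Nat) : Int :=
  if e = 0 then r
  else sqLoop (if e % 2 = 1 then r * base else r) (base * base) (e / 2)
decreasing_by exact Nat.div_lt_self (Nat.pos_of_ne_zero (by assumption)) (by decide)

def solution_alt (common : List Int) : Int :=
  let a := (PySem.List.pyGet? common 0).getD 0
  let b := (PySem.List.pyGet? common 1).getD 0
  let c := (PySem.List.pyGet? common 2).getD 0
  if |a - b| = |b - c| then
    (PySem.List.pyGet? common (-1)).getD 0 + b - a
  else
    let be := if a ≠ 1 then (b - a, common.length + 1) else (b, common.length)
    sqLoop 1 be.1 be.2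

-- ===== PRECONDITION & SPEC =====
-- Pre_: both Pythons raise IndexError on lists with fewer than 3 elements.
def Pre_solution (common : List Int) : Prop := 3 ≤ common.length
instance (common : List Int) : Decidable (Pre_solution common) := by unfold Pre_solution; infer_instance
def pvWitness_solution : List Int := [1, 2, 3]
def Spec_solution (common : List Int) (out : Int) : Prop := out = solution_alt common
instance (common : List Int) (out : Int) : Decidable (Spec_solution common out) := by unfold Spec_solution; infer_instance

-- ===== CLAIM (what is proved, stated in full; the proofs are below) =====
def Claim_equal_solution : Prop := ∀ (common : List Int), Dom_solution common → Pre_solution common → Spec_solution common (solution common)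

-- ===== LEMMAS AND PROOFS =====
lemma sqLoop_eq (e : Nat) (r base : Int) : sqLoop r base e = r * base ^ e := by
  induction e using Nat.strong_induction_on generalizing r base with
  | _ e ih =>
    rw [sqLoop]
    by_cases he : e = 0
    · simp [he]
    · rw [if_neg he, ih (e / 2) (Nat.div_lt_self (Nat.pos_of_ne_zero he) (by decide))]
      have h2 : base ^ e = (base * base) ^ (e / 2) * base ^ (e % 2) := by
        rw [← pow_two, ← pow_mul, ← pow_add]
        congr 1
        omega
      rcases Nat.mod_two_eq_zero_or_one e with h | h <;> simp [h, h2] <;> ring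

lemma foldl_mul_pow (l : List Int) (r acc : Int) :
    l.foldl (fun a _ => a * r) acc = acc * r ^ l.length := by
  induction l generalizing acc with
  | nil => simp
  | cons x xs ih => simp [List.foldl, ih, pow_succ]; ring

lemma last_idx_eq_neg_one (common : List Int) (h : 3 ≤ common.length) :
    (PySem.List.pyGet? common ((common.length : Int) - 1)).getD 0
      = (PySem.List.pyGet? common (-1)).getD 0 := by
  simp [PySem.List.pyGet?, PySem.List.pyIdx?]
  split_ifs with hA hB <;> simp_all <;> omega

-- ===== VERDICT (by name: the statement is the Claim_ definition above) =====
theorem solution_spec : Claim_equal_solution := by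
  intro common _ hpre
  unfold Spec_solution solution solution_alt
  rw [last_idx_eq_neg_one common hpre]
  simp only [foldl_mul_pow, PySem.List.length_pyRange_one, sqLoop_eq, one_mul]
  split_ifs with h1 h2
  · ring
  · congr 1 <;> omega
  · congr 1 <;> omega
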